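-- pv_equiv track=rewrite | github.com/krsh732/GoogleCTF2020 | hardware/basics/solve.py | solve_check
-- ===== SOURCE A (Python) =====
-- class PtrHack:
--     def __init__(self):
--         self.value = None
--
-- def rtl_concat(*args):
--     return [i for l in args[::-1] for i in l]
--
-- def solve_check(target_num):
--     memory = [[PtrHack() for j in range(7)] for i in range(8)]
--     magic = rtl_concat(
--         rtl_concat(memory[0], memory[5]),
--         rtl_concat(memory[6], memory[2]),
--         rtl_concat(memory[4], memory[3]),
--         rtl_concat(memory[7], memory[1])
--     )
--     kittens = rtl_concat(magic[0:10], magic[22:42], magic[10:22], magic[42:56])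
--     for i, p in enumerate(kittens):
--         p.value = (target_num >> i) & 1
--
--     s = ""
--     for i in range(len(memory)):
--         s += chr(sum(p.value*2**j for j, p in enumerate(memory[(5*i) & 7])))
--     return s
-- ===== SOURCE B (Python) =====
-- # Flat 56-entry permutation table: PERM[7*i+j] = source bit of target_num for
-- # bit j of output char i (pre-composed from A's pointer shuffling).
-- PERM = [7, 8, 9, 10, 11, 12, 13,
--         0, 1, 2, 3, 4, 5, 6,
--         32, 33, 34, 35, 36, 37, 38,
--         53, 54, 55, 14, 15, 16, 17,
--         25, 26, 27, 28, 29, 30, 31,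
--         46, 47, 48, 49, 50, 51, 52,
--         39, 40, 41, 42, 43, 44, 45,
--         18, 19, 20, 21, 22, 23, 24]
--
-- def solve_check(target_num):
--     return "".join(
--         chr(sum(((target_num >> PERM[7*i + j]) & 1) * 2**j for j in range(7)))
--         for i in range(8))
-- ===== Notes on version B (the rewrite author's own statement) =====
-- stated objective: simpler
-- what changed: B replaces A's graph of aliased mutable PtrHack cells and three staged list reorderings with a single precomputed flat precomputed permutation table (one entry per bit), reading each output bit directly from target_num.
import Mathlib
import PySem

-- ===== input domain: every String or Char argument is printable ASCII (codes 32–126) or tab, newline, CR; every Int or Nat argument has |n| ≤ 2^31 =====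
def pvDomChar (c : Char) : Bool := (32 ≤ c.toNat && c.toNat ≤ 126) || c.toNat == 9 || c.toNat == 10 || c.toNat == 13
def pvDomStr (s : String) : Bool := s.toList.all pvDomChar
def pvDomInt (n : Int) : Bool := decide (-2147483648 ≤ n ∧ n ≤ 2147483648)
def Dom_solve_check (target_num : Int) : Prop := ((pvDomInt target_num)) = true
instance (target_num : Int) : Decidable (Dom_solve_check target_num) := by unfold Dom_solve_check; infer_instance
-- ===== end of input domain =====

-- B replaces A's aliased mutable PtrHack cells and three staged reorderings with one
-- precomputed flat permutation table (objective: simpler).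

-- ===== PORT A =====
-- A's PtrHack objects are modeled as indices 0..55 into an explicit store
-- (memory[i][j] ↦ i*7+j); the aliasing between memory/magic/kittens is exact:
-- all three lists hold the same cell indices, and assignment mutates the store.
def rtl_concat (args : List (List Nat)) : List Nat :=
  (args.reverse).flatMap (fun l => l)   -- [i for l in args[::-1] for i in l]

def pvMemory : List (List Nat) :=
  (List.range 8).map (fun i => (List.range 7).map (fun j => i*7+j))

def pvUpd (f : Nat → Int) (i : Nat) (v : Int) : Nat → Int :=
  fun k => if k = i then v else f k

def solve_check (target_num : Int) : String :=
  let memory := pvMemory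
  let magic := rtl_concat [
    rtl_concat [memory.getD 0 [], memory.getD 5 []],
    rtl_concat [memory.getD 6 [], memory.getD 2 []],
    rtl_concat [memory.getD 4 [], memory.getD 3 []],
    rtl_concat [memory.getD 7 [], memory.getD 1 []]]
  let kittens := rtl_concat [
    PySem.List.slice magic (some 0) (some 10),
    PySem.List.slice magic (some 22) (some 42),
    PySem.List.slice magic (some 10) (some 22),
    PySem.List.slice magic (some 42) (some 56)]
  -- for i, p in enumerate(kittens): p.value = (target_num >> i) & 1
  let store := (PySem.List.enumerate kittens).foldl
    (fun st ip => pvUpd st ip.2 (PySem.Int.band (target_num >>> ip.1.toNat) 1)) (fun _ => 0)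
  -- enumerate indices are ≥ 0, so .toNat is exact for Python's `>> i`
  (List.range memory.length).foldl
    (fun s i =>
      s.push (Char.ofNat
        (((PySem.List.enumerate (memory.getD ((5*i) &&& 7) [])).foldl
            (fun acc jp => acc + store jp.2 * 2^jp.1.toNat) 0).toNat)))
    ""

-- ===== PORT B =====
def pvPerm : List Nat := [7, 8, 9, 10, 11, 12, 13,
        0, 1, 2, 3, 4, 5, 6,
        32, 33, 34, 35, 36, 37, 38,
        53, 54, 55, 14, 15, 16, 17,
        25, 26, 27, 28, 29, 30, 31,
        46, 47, 48, 49, 50, 51, 52,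
        39, 40, 41, 42, 43, 44, 45,
        18, 19, 20, 21, 22, 23, 24]

def solve_check_alt (target_num : Int) : String :=
  String.join ((List.range 8).map (fun i =>
    String.ofList [Char.ofNat
      (((List.range 7).foldl
          (fun acc j => acc + (PySem.Int.band (target_num >>> pvPerm.getD (7*i+j) 0) 1) * 2^j) 0).toNat)]))

-- ===== PRECONDITION & SPEC =====
def Spec_solve_check (target_num : Int) (out : String) : Prop := out = solve_check_alt target_num
instance (target_num : Int) (out : String) : Decidable (Spec_solve_check target_num out) := by unfold Spec_solve_check; infer_instance

-- ===== CLAIM (what is proved, stated in full; the proofs are below) =====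
def Claim_equal_solve_check : Prop := ∀ (target_num : Int), Dom_solve_check target_num → Spec_solve_check target_num (solve_check target_num)

-- ===== LEMMAS AND PROOFS =====
lemma pv_sr0 (t : Int) : t >>> (0:ℤ) = t := by
  have := Int.shiftRight_natCast_right t 0
  norm_num at this
  simpa using this

-- ===== VERDICT (by name: the statement is the Claim_ definition above) =====
theorem solve_check_spec : Claim_equal_solve_check := by
  intro t _
  unfold Spec_solve_check
  apply String.toList_injective
  simp [solve_check, solve_check_alt, rtl_concat, pvMemory, pvUpd, pvPerm,
    PySem.List.enumerate, PySem.List.slice, List.range_succ, String.join]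
  simp [← Int.shiftRight_natCast_right, pv_sr0]
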